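-- pv_equiv track=rewrite | github.com/iamskp99/Leetcode-Hard-and-Medium | 3561-remove-methods-from-project/remove-methods-from-project.py | remainingMethods
-- ===== SOURCE A (Python) =====
-- from typing import List
--
-- from collections import deque
--
-- def bfs(start,graph):
--     queue = deque([start])
--     visited = {start}
--     explored = set()
--     while len(queue) > 0:
--         node = queue.popleft()
--         explored.add(node)
--         for neighbour in graph.get(node,[]):
--             if neighbour not in visited:
--                 queue.append(neighbour)
--                 visited.add(neighbour)
--
--     return explored
--
-- def check(start,graph,explored,visited):
--     queue = deque([start])
--     visited.add(start)
--     while len(queue) > 0: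
--         node = queue.popleft()
--         for neighbour in graph.get(node,[]):
--             if neighbour not in visited:
--                 queue.append(neighbour)
--                 visited.add(neighbour)
--
--             if neighbour in explored:
--                 return False
--
--     return True
--
-- def remainingMethods(n: int, k: int, invocations: List[List[int]]) -> List[int]:
--     graph = {}
--     for x in invocations:
--         u,v = x[0],x[1]
--         if u in graph:
--             graph[u].append(v)
--
--         else:
--             graph[u] = [v]
--
--     explored = bfs(k,graph)
--     visited,flag = set(),False
--     for i in range(n):
--         if i in explored:
--             continue
--
--         if i in visited:
--             continue
--
--         if check(i,graph,explored,visited):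
--             continue
--
--         else:
--             flag = True
--
--     if flag:
--         return [i for i in range(n)]
--
--     else:
--         ans = []
--         for i in range(n):
--             if i not in explored:
--                 ans.append(i)
--
--         return ans
-- ===== SOURCE B (Python) =====
-- from typing import List
--
--
-- def _saturate(invocations, seed, si, di):
--     # closure of seed under the edge rule x[si] -> x[di], by repeated passes
--     # over the raw edge list until a full pass adds nothing (no graph built)
--     s = set(seed)
--     changed = True
--     while changed:
--         changed = False
--         for x in invocations:
--             a, b = x[si], x[di]
--             if a in s and b not in s:
--                 s.add(b)
--                 changed = True
--     return s
--
--
-- def remainingMethods(n: int, k: int, invocations: List[List[int]]) -> List[int]: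
--     explored = _saturate(invocations, [k], 0, 1)      # reachable from k
--     bad = _saturate(invocations, explored, 1, 0)      # can reach explored
--     for i in range(n):
--         if i not in explored and i in bad:
--             return list(range(n))
--     return [i for i in range(n) if i not in explored]
-- ===== Notes on version B (the rewrite author's own statement) =====
-- stated objective: alternative
-- what changed: B builds no adjacency dict and runs no BFS at all: it computes the k-reachable set by semi-naive fixpoint passes directly over the raw edge list, then computes the set of nodes that can reach it by the same saturation helper with the edge rule reversed, and reads the flag off a single membership scan of range(n); A builds a dict graph, BFSes from k, and launches a fresh BFS ('check') from every unexplored node.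
import Mathlib
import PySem

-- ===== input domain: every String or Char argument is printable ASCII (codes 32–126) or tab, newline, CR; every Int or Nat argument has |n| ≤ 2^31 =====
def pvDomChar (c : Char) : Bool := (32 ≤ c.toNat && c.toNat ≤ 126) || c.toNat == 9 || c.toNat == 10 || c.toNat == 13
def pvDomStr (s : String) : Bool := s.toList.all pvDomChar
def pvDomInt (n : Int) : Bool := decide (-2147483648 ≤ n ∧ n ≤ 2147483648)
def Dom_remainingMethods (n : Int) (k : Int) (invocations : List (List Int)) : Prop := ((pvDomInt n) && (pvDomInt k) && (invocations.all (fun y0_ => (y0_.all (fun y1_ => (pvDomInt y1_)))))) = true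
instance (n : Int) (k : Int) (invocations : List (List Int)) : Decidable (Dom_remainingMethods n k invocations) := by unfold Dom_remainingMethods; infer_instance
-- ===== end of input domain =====

-- B drops A's graph dict and BFS traversals entirely: it saturates the reachable set by
-- repeated passes over the raw edge list (forward from k, then with the edge rule reversed
-- from the explored set); same return value, proved on Pre_.

-- ===== PORT A =====
-- graph building: 'if u in graph: graph[u].append(v) else: graph[u] = [v]'
def pvBuildGraphA (invocations : List (List Int)) : PySem.Dict Int (List Int) :=
  invocations.foldl (fun g x =>
    let u := PySem.List.pyGetD x 0 0
    let v := PySem.List.pyGetD x 1 0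
    if PySem.Dict.contains g u then PySem.Dict.modify g u [] (fun l => l ++ [v])
    else PySem.Dict.insert g u [v]) PySem.Dict.empty

-- the 'while queue' loop of bfs(); fuel is a termination guard only (chosen large enough at the call site)
def pvBfsLoop (g : PySem.Dict Int (List Int)) : Nat → List Int → PySem.Set Int → PySem.Set Int → PySem.Set Int
  | _, [], _, explored => explored
  | 0, _ :: _, _, explored => explored
  | fuel + 1, node :: queue, visited, explored =>
      let e := PySem.Set.add explored node
      let p := (PySem.Dict.getD g node []).foldl
        (fun (p : List Int × PySem.Set Int) nb =>
          if nb ∈ p.2 then p else (p.1 ++ [nb], PySem.Set.add p.2 nb)) (queue, visited)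
      pvBfsLoop g fuel p.1 p.2 e

-- the inner 'for neighbour in graph.get(node, [])' of check(), with its early 'return False'
def pvCheckNbrs (explored : PySem.Set Int) : List Int → List Int → PySem.Set Int → Bool × List Int × PySem.Set Int
  | [], q, v => (true, q, v)
  | nb :: rest, q, v =>
      let qv := if nb ∈ v then (q, v) else (q ++ [nb], PySem.Set.add v nb)
      if nb ∈ explored then (false, qv.1, qv.2)
      else pvCheckNbrs explored rest qv.1 qv.2

-- the 'while queue' loop of check(); returns (result, mutated shared visited)
def pvCheckLoop (g : PySem.Dict Int (List Int)) (explored : PySem.Set Int) :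
    Nat → List Int → PySem.Set Int → Bool × PySem.Set Int
  | _, [], v => (true, v)
  | 0, _ :: _, v => (true, v)
  | fuel + 1, node :: queue, v =>
      let r := pvCheckNbrs explored (PySem.Dict.getD g node []) queue v
      if r.1 then pvCheckLoop g explored fuel r.2.1 r.2.2 else (false, r.2.2)

-- one iteration of A's 'for i in range(n)' loop; state = (visited, flag)
def pvFlagStep (g : PySem.Dict Int (List Int)) (explored : PySem.Set Int) (fuel : Nat)
    (p : PySem.Set Int × Bool) (i : Int) : PySem.Set Int × Bool :=
  if i ∈ explored then p
  else if i ∈ p.1 then p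
  else
    let c := pvCheckLoop g explored fuel [i] (PySem.Set.add p.1 i)
    if c.1 then (c.2, p.2) else (c.2, true)

def remainingMethods (n : Int) (k : Int) (invocations : List (List Int)) : List Int :=
  let g := pvBuildGraphA invocations
  let fuel := (PySem.Dict.values g).flatten.length + n.toNat + 1
  let explored := pvBfsLoop g fuel [k] (PySem.Set.add PySem.Set.empty k) PySem.Set.empty
  let r := (PySem.List.pyRange 0 n 1).foldl (pvFlagStep g explored fuel) (PySem.Set.empty, false)
  if r.2 then PySem.List.pyRange 0 n 1
  else (PySem.List.pyRange 0 n 1).foldl (fun ans i => if i ∈ explored then ans else ans ++ [i]) []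

-- ===== PORT B =====
-- one 'for x in invocations' pass of _saturate; state = (s, changed)
def pvSatPass (invocations : List (List Int)) (si di : Int) (s : PySem.Set Int) :
    PySem.Set Int × Bool :=
  invocations.foldl (fun (p : PySem.Set Int × Bool) x =>
    let a := PySem.List.pyGetD x si 0
    let b := PySem.List.pyGetD x di 0
    if a ∈ p.1 ∧ b ∉ p.1 then (PySem.Set.add p.1 b, true) else p) (s, false)

-- the 'while changed' loop of _saturate; fuel is a termination guard only
def pvSatLoop (invocations : List (List Int)) (si di : Int) : Nat → PySem.Set Int → PySem.Set Int
  | 0, s => s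
  | fuel + 1, s =>
      let p := pvSatPass invocations si di s
      if p.2 then pvSatLoop invocations si di fuel p.1 else p.1

def pvSaturate (invocations : List (List Int)) (seed : List Int) (si di : Int) : PySem.Set Int :=
  pvSatLoop invocations si di (invocations.length + 1) (PySem.Set.ofList seed)

def remainingMethods_alt (n : Int) (k : Int) (invocations : List (List Int)) : List Int :=
  let explored := pvSaturate invocations [k] 0 1
  let bad := pvSaturate invocations explored 1 0
  if (PySem.List.pyRange 0 n 1).any
      (fun i => !(PySem.Set.contains explored i) && PySem.Set.contains bad i)
  then PySem.List.pyRange 0 n 1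
  else (PySem.List.pyRange 0 n 1).filter (fun i => !(PySem.Set.contains explored i))

-- ===== PRECONDITION & SPEC =====
-- Pre_ excludes exactly the inputs on which A raises (IndexError): an invocation row with fewer than two entries.
def Pre_remainingMethods (n : Int) (k : Int) (invocations : List (List Int)) : Prop :=
  ∀ x ∈ invocations, 2 ≤ x.length
instance (n : Int) (k : Int) (invocations : List (List Int)) : Decidable (Pre_remainingMethods n k invocations) := by
  unfold Pre_remainingMethods; infer_instance

def pvWitness_remainingMethods : Int × Int × List (List Int) := (3, 0, [[0, 1], [2, 1]])

def Spec_remainingMethods (n : Int) (k : Int) (invocations : List (List Int)) (out : List Int) : Prop := out = remainingMethods_alt n k invocations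
instance (n : Int) (k : Int) (invocations : List (List Int)) (out : List Int) : Decidable (Spec_remainingMethods n k invocations out) := by unfold Spec_remainingMethods; infer_instance

-- ===== CLAIM (what is proved, stated in full; the proofs are below) =====
def Claim_equal_remainingMethods : Prop := ∀ (n : Int) (k : Int) (invocations : List (List Int)), Dom_remainingMethods n k invocations → Pre_remainingMethods n k invocations → Spec_remainingMethods n k invocations (remainingMethods n k invocations)

-- ===== LEMMAS AND PROOFS =====

-- reachability in the invocation graph (dict form), from a list of sources
inductive pvReach (g : PySem.Dict Int (List Int)) (src : List Int) : Int → Prop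
  | base (x : Int) (hx : x ∈ src) : pvReach g src x
  | step (u v : Int) (hu : pvReach g src u) (hv : v ∈ PySem.Dict.getD g u []) : pvReach g src v

-- reachability directly over the raw edge list, from a seed list (B's saturation closure)
inductive pvClos (inv : List (List Int)) (si di : Int) (seed : List Int) : Int → Prop
  | base (x : Int) (hx : x ∈ seed) : pvClos inv si di seed x
  | step (r : List Int) (hr : r ∈ inv) (h : pvClos inv si di seed (PySem.List.pyGetD r si 0)) :
      pvClos inv si di seed (PySem.List.pyGetD r di 0)

lemma pvClos_mono_seed (inv : List (List Int)) (si di : Int) (s1 s2 : List Int)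
    (h : ∀ y ∈ s1, y ∈ s2) {x : Int} (hx : pvClos inv si di s1 x) : pvClos inv si di s2 x := by
  induction hx with
  | base y hy => exact pvClos.base y (h y hy)
  | step r hr _ ih => exact pvClos.step r hr ih

lemma pvClos_trans (inv : List (List Int)) (si di : Int) (x y z : Int)
    (h1 : pvClos inv si di [y] z) (h2 : pvClos inv si di [x] y) : pvClos inv si di [x] z := by
  induction h1 with
  | base w hw =>
      have : w = y := by simpa using hw
      subst this; exact h2
  | step r hr _ ih => exact pvClos.step r hr ih

lemma pvClos_exists_single (inv : List (List Int)) (si di : Int) (seed : List Int) (x : Int)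
    (hx : pvClos inv si di seed x) : ∃ s ∈ seed, pvClos inv si di [s] x := by
  induction hx with
  | base y hy => exact ⟨y, hy, pvClos.base y (by simp)⟩
  | step r hr _ ih =>
      obtain ⟨s, hs, hcl⟩ := ih
      exact ⟨s, hs, pvClos.step r hr hcl⟩

lemma pvClos_rev (inv : List (List Int)) (x e : Int)
    (h : pvClos inv 0 1 [x] e) : pvClos inv 1 0 [e] x := by
  induction h with
  | base w hw =>
      have hwx : w = x := by simpa using hw
      rw [hwx]
      exact pvClos.base x (by simp)
  | step r hr _ ih =>
      have hba : pvClos inv 1 0 [PySem.List.pyGetD r 1 0] (PySem.List.pyGetD r 0 0) :=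
        pvClos.step r hr (pvClos.base _ (by simp))
      exact pvClos_trans inv 1 0 _ _ x ih hba

lemma pvClos_bwd_to_fwd (inv : List (List Int)) (E : List Int) (i : Int)
    (h : pvClos inv 1 0 E i) : ∃ e ∈ E, pvClos inv 0 1 [i] e := by
  induction h with
  | base y hy => exact ⟨y, hy, pvClos.base y (by simp)⟩
  | step r hr _ ih =>
      obtain ⟨e, he, hcl⟩ := ih
      have hab : pvClos inv 0 1 [PySem.List.pyGetD r 0 0] (PySem.List.pyGetD r 1 0) :=
        pvClos.step r hr (pvClos.base _ (by simp))
      exact ⟨e, he, pvClos_trans inv 0 1 _ _ e hcl hab⟩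

-- the dict A builds, read through getD, is exactly the edge list grouped by source
lemma pvBuildGraphA_eq_modify (inv : List (List Int)) :
    pvBuildGraphA inv =
      (inv.map (fun x => (PySem.List.pyGetD x 0 0, PySem.List.pyGetD x 1 0))).foldl
        (fun d p => PySem.Dict.modify d p.1 [] (fun l => l ++ [p.2])) PySem.Dict.empty := by
  unfold pvBuildGraphA
  rw [List.foldl_map]
  have hf : (fun (g : PySem.Dict Int (List Int)) (x : List Int) =>
      let u := PySem.List.pyGetD x 0 0
      let v := PySem.List.pyGetD x 1 0
      if PySem.Dict.contains g u then PySem.Dict.modify g u [] (fun l => l ++ [v])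
      else PySem.Dict.insert g u [v]) =
      (fun (d : PySem.Dict Int (List Int)) (x : List Int) =>
        PySem.Dict.modify d (PySem.List.pyGetD x 0 0, PySem.List.pyGetD x 1 0).1 []
          (fun l => l ++ [(PySem.List.pyGetD x 0 0, PySem.List.pyGetD x 1 0).2])) := by
    funext d x
    dsimp only
    by_cases hc : PySem.Dict.contains d (PySem.List.pyGetD x 0 0) = true
    · rw [if_pos hc]
    · rw [if_neg hc]
      simp only [PySem.Dict.modify]
      have hcc : PySem.Dict.contains d (PySem.List.pyGetD x 0 0) = false := by
        revert hc; cases PySem.Dict.contains d (PySem.List.pyGetD x 0 0) <;> simp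
      rw [PySem.Dict.getD_of_not_contains d ([] : List Int) hcc]
      simp
  rw [hf]

lemma pvMem_getD_buildA (inv : List (List Int)) (u v : Int) :
    v ∈ PySem.Dict.getD (pvBuildGraphA inv) u [] ↔
      ∃ r ∈ inv, PySem.List.pyGetD r 0 0 = u ∧ PySem.List.pyGetD r 1 0 = v := by
  rw [pvBuildGraphA_eq_modify, PySem.Dict.getD_foldl_modify_append]
  simp only [PySem.Dict.getD_empty, List.nil_append, List.mem_map, List.mem_filter,
    List.mem_map]
  constructor
  · rintro ⟨p, ⟨⟨r, hr, rfl⟩, hpu⟩, rfl⟩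
    exact ⟨r, hr, by simpa using hpu, rfl⟩
  · rintro ⟨r, hr, h0, h1⟩
    exact ⟨(u, v), ⟨⟨r, hr, by rw [h0, h1]⟩, by simp⟩, rfl⟩

-- dict reachability = edge-list closure
lemma pvReach_iff_clos (inv : List (List Int)) (seed : List Int) (x : Int) :
    pvReach (pvBuildGraphA inv) seed x ↔ pvClos inv 0 1 seed x := by
  constructor
  · intro h
    induction h with
    | base y hy => exact pvClos.base y hy
    | step u v _ hv ih =>
        obtain ⟨r, hr, h0, h1⟩ := (pvMem_getD_buildA inv u v).mp hv
        subst h0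
        exact h1 ▸ pvClos.step r hr ih
  · intro h
    induction h with
    | base y hy => exact pvReach.base y hy
    | step r hr _ ih =>
        exact pvReach.step _ _ ih ((pvMem_getD_buildA inv _ _).mpr ⟨r, hr, rfl, rfl⟩)

-- one pass of _saturate: it appends 'fresh' new elements, reports whether any were added,
-- keeps the set Nodup and sound w.r.t. pvClos, and certifies closure when nothing was added
lemma pvSatFold_spec (inv : List (List Int)) (si di : Int) (seed : List Int) :
    ∀ (l : List (List Int)), (∀ r ∈ l, r ∈ inv) →
    ∀ (s : PySem.Set Int) (c : Bool), s.Nodup → (∀ y ∈ s, pvClos inv si di seed y) →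
    ∃ fresh : List Int,
      l.foldl (fun (p : PySem.Set Int × Bool) x =>
        let a := PySem.List.pyGetD x si 0
        let b := PySem.List.pyGetD x di 0
        if a ∈ p.1 ∧ b ∉ p.1 then (PySem.Set.add p.1 b, true) else p) (s, c) =
        (s ++ fresh, c || !fresh.isEmpty) ∧
      (s ++ fresh).Nodup ∧
      (∀ b ∈ fresh, b ∈ l.map (fun x => PySem.List.pyGetD x di 0)) ∧
      (∀ y ∈ s ++ fresh, pvClos inv si di seed y) ∧
      (fresh = [] → ∀ r ∈ l, PySem.List.pyGetD r si 0 ∈ s → PySem.List.pyGetD r di 0 ∈ s) := by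
  intro l
  induction l with
  | nil =>
      intro _ s c hnd hsound
      exact ⟨[], by simp, by simpa, by simp, by simpa, by simp⟩
  | cons r rest ih =>
      intro hl s c hnd hsound
      rw [List.foldl_cons]
      by_cases hcond : PySem.List.pyGetD r si 0 ∈ s ∧ PySem.List.pyGetD r di 0 ∉ s
      · rw [if_pos hcond]
        have hadd : PySem.Set.add s (PySem.List.pyGetD r di 0) = s ++ [PySem.List.pyGetD r di 0] :=
          PySem.Set.add_of_not_mem hcond.2
        rw [hadd]
        have hnd' : (s ++ [PySem.List.pyGetD r di 0]).Nodup := by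
          simp [List.nodup_append, hnd]
          intro a ha hab
          exact hcond.2 (hab ▸ ha)
        have hsound' : ∀ y ∈ s ++ [PySem.List.pyGetD r di 0], pvClos inv si di seed y := by
          intro y hy
          rcases List.mem_append.mp hy with h | h
          · exact hsound y h
          · have : y = PySem.List.pyGetD r di 0 := by simpa using h
            rw [this]
            exact pvClos.step r (hl r List.mem_cons_self) (hsound _ hcond.1)
        obtain ⟨fresh, heq, hnd2, hmem, hsound2, _⟩ :=
          ih (fun r' hr' => hl r' (List.mem_cons_of_mem _ hr'))
            (s ++ [PySem.List.pyGetD r di 0]) true hnd' hsound'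
        refine ⟨PySem.List.pyGetD r di 0 :: fresh, ?_, by simpa using hnd2, ?_, ?_, by simp⟩
        · rw [heq]; simp
        · intro b hb
          rcases List.mem_cons.mp hb with rfl | hb
          · simp
          · simpa using List.mem_cons_of_mem _ (hmem b hb)
        · intro y hy
          apply hsound2
          simpa using hy
      · rw [if_neg hcond]
        obtain ⟨fresh, heq, hnd2, hmem, hsound2, hclosed⟩ :=
          ih (fun r' hr' => hl r' (List.mem_cons_of_mem _ hr')) s c hnd hsound
        refine ⟨fresh, heq, hnd2, ?_, hsound2, ?_⟩
        · exact fun b hb => List.mem_cons_of_mem _ (hmem b hb)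
        · intro hfresh r' hr' hin
          rcases List.mem_cons.mp hr' with rfl | hr'
          · by_cases h2 : PySem.List.pyGetD r' di 0 ∈ s
            · exact h2
            · exact absurd ⟨hin, h2⟩ hcond
          · exact hclosed hfresh r' hr' hin

-- the 'while changed' loop reaches a fixpoint when given enough fuel
lemma pvSatLoop_spec (inv : List (List Int)) (si di : Int) (seed : List Int) :
    ∀ (fuel : Nat) (s : PySem.Set Int), s.Nodup → (∀ y ∈ s, pvClos inv si di seed y) →
    (inv.map (fun x => PySem.List.pyGetD x di 0)).toFinset.card + 1 ≤
      fuel + (s.toFinset ∩ (inv.map (fun x => PySem.List.pyGetD x di 0)).toFinset).card →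
    (∀ y ∈ s, y ∈ pvSatLoop inv si di fuel s) ∧
    (∀ y ∈ pvSatLoop inv si di fuel s, pvClos inv si di seed y) ∧
    (∀ r ∈ inv, PySem.List.pyGetD r si 0 ∈ pvSatLoop inv si di fuel s →
      PySem.List.pyGetD r di 0 ∈ pvSatLoop inv si di fuel s) := by
  intro fuel
  induction fuel with
  | zero =>
      intro s _ _ hcard
      exfalso
      have hle : (s.toFinset ∩ (inv.map (fun x => PySem.List.pyGetD x di 0)).toFinset).card ≤
          (inv.map (fun x => PySem.List.pyGetD x di 0)).toFinset.card :=
        Finset.card_le_card Finset.inter_subset_right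
      omega
  | succ fuel ih =>
      intro s hnd hsound hcard
      obtain ⟨fresh, heq, hnd2, hmem, hsound2, hclosed⟩ :=
        pvSatFold_spec inv si di seed inv (fun r hr => hr) s false hnd hsound
      have hpass : pvSatPass inv si di s = (s ++ fresh, !fresh.isEmpty) := by
        unfold pvSatPass
        rw [heq]
        simp
      match hfr : fresh with
      | [] =>
          have hres : pvSatLoop inv si di (fuel + 1) s = s := by
            simp only [pvSatLoop, hpass]
            simp
          rw [hres]
          subst hfr
          exact ⟨fun y hy => hy, hsound, fun r hr h => hclosed rfl r hr h⟩
      | b :: fresh' =>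
          subst hfr
          have hres : pvSatLoop inv si di (fuel + 1) s =
              pvSatLoop inv si di fuel (s ++ b :: fresh') := by
            simp only [pvSatLoop, hpass]
            simp
          rw [hres]
          have hbU : b ∈ (inv.map (fun x => PySem.List.pyGetD x di 0)) := hmem b List.mem_cons_self
          have hbs : b ∉ s := by
            have := List.disjoint_of_nodup_append hnd2
            intro hb
            exact this hb List.mem_cons_self
          have hcard' : (inv.map (fun x => PySem.List.pyGetD x di 0)).toFinset.card + 1 ≤
              fuel + ((s ++ b :: fresh').toFinset ∩
                (inv.map (fun x => PySem.List.pyGetD x di 0)).toFinset).card := by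
            have hsub : insert b (s.toFinset ∩ (inv.map (fun x => PySem.List.pyGetD x di 0)).toFinset) ⊆
                (s ++ b :: fresh').toFinset ∩ (inv.map (fun x => PySem.List.pyGetD x di 0)).toFinset := by
              intro y hy
              rcases Finset.mem_insert.mp hy with rfl | hy
              · exact Finset.mem_inter.mpr ⟨by simp, List.mem_toFinset.mpr hbU⟩
              · obtain ⟨h1, h2⟩ := Finset.mem_inter.mp hy
                exact Finset.mem_inter.mpr ⟨by
                  rw [List.mem_toFinset] at h1 ⊢
                  exact List.mem_append_left _ h1, h2⟩
            have hbni : b ∉ s.toFinset ∩ (inv.map (fun x => PySem.List.pyGetD x di 0)).toFinset := by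
              intro hb
              exact hbs (List.mem_toFinset.mp (Finset.mem_inter.mp hb).1)
            have := Finset.card_le_card hsub
            rw [Finset.card_insert_of_notMem hbni] at this
            omega
          have := ih (s ++ b :: fresh') hnd2 hsound2 hcard'
          exact ⟨fun y hy => this.1 y (List.mem_append_left _ hy), this.2.1, this.2.2⟩

-- membership in pvSaturate is exactly the edge-list closure of the seed
lemma pvMem_saturate (inv : List (List Int)) (seed : List Int) (si di : Int) (y : Int) :
    y ∈ pvSaturate inv seed si di ↔ pvClos inv si di seed y := by
  have hcard : (inv.map (fun x => PySem.List.pyGetD x di 0)).toFinset.card + 1 ≤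
      (inv.length + 1) + ((PySem.Set.ofList seed).toFinset ∩
        (inv.map (fun x => PySem.List.pyGetD x di 0)).toFinset).card := by
    have h1 := List.toFinset_card_le (inv.map (fun x => PySem.List.pyGetD x di 0))
    rw [List.length_map] at h1
    omega
  obtain ⟨hsub, hsound, hclosed⟩ := pvSatLoop_spec inv si di seed (inv.length + 1)
    (PySem.Set.ofList seed) (PySem.Set.nodup_ofList seed)
    (fun y hy => pvClos.base y ((PySem.Set.mem_ofList seed y).mp hy)) hcard
  constructor
  · exact fun hy => hsound y hy
  · intro hy
    induction hy with
    | base z hz => exact hsub z ((PySem.Set.mem_ofList seed z).mpr hz)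
    | step r hr _ ihz => exact hclosed r hr ihz

lemma pvReach_subset_closed (g : PySem.Dict Int (List Int)) (src E : List Int)
    (hs : ∀ x ∈ src, x ∈ E) (hc : ∀ u ∈ E, ∀ v ∈ PySem.Dict.getD g u [], v ∈ E) :
    ∀ x, pvReach g src x → x ∈ E := by
  intro x hx
  induction hx with
  | base y hy => exact hs y hy
  | step u v _ hv ih => exact hc u ih v hv

lemma pvNodup_length_le (v U : List Int) (hn : v.Nodup) (hs : ∀ x ∈ v, x ∈ U) :
    v.length ≤ U.toFinset.card := by
  calc v.length = v.toFinset.card := (List.toFinset_card_of_nodup hn).symm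
    _ ≤ U.toFinset.card := by
        apply Finset.card_le_card
        intro x hx
        rw [List.mem_toFinset] at *
        exact hs x hx

lemma pvMem_flatten_values (g : PySem.Dict Int (List Int)) (u w : Int)
    (hw : w ∈ PySem.Dict.getD g u []) : w ∈ (PySem.Dict.values g).flatten := by
  rcases h : PySem.Dict.get? g u with _ | l
  · rw [PySem.Dict.getD_eq_get?_getD, h] at hw
    simp at hw
  · have hitems : (u, l) ∈ g.items := PySem.Dict.mem_items_of_get?_eq_some g h
    have hl : l ∈ PySem.Dict.values g := by
      simp only [PySem.Dict.values]
      exact List.mem_map.mpr ⟨(u, l), hitems, rfl⟩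
    rw [PySem.Dict.getD_eq_get?_getD, h] at hw
    exact List.mem_flatten.mpr ⟨l, hl, hw⟩

-- === fold lemmas for the inner 'for neighbour in …' loops of A ===

lemma pvBfsFold_spec (l : List Int) : ∀ (q : List Int) (v : PySem.Set Int), v.Nodup →
    ∃ fresh : List Int,
      l.foldl (fun (p : List Int × PySem.Set Int) nb =>
        if nb ∈ p.2 then p else (p.1 ++ [nb], PySem.Set.add p.2 nb)) (q, v) = (q ++ fresh, v ++ fresh) ∧
      (v ++ fresh).Nodup ∧ (∀ x ∈ fresh, x ∈ l) ∧ (∀ nb ∈ l, nb ∈ v ++ fresh) := by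
  induction l with
  | nil => intro q v hn; exact ⟨[], by simp, by simpa, by simp, by simp⟩
  | cons nb rest ih =>
    intro q v hn
    rw [List.foldl_cons]
    by_cases h : nb ∈ v
    · rw [if_pos h]
      obtain ⟨fresh, heq, hnd, hsub, hall⟩ := ih q v hn
      exact ⟨fresh, heq, hnd, fun x hx => List.mem_cons_of_mem _ (hsub x hx),
        by
          intro x hx
          rcases List.mem_cons.mp hx with rfl | hx
          · exact List.mem_append_left _ h
          · exact hall x hx⟩
    · rw [if_neg h]
      have hadd : PySem.Set.add v nb = v ++ [nb] := PySem.Set.add_of_not_mem h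
      rw [hadd]
      have hnd' : (v ++ [nb]).Nodup := by
        simp [List.nodup_append, hn]
        exact fun a ha hab => h (hab ▸ ha)
      obtain ⟨fresh, heq, hnd2, hsub, hall⟩ := ih (q ++ [nb]) (v ++ [nb]) hnd'
      refine ⟨nb :: fresh, ?_, ?_, ?_, ?_⟩
      · rw [heq]; simp
      · simpa using hnd2
      · intro x hx
        rcases List.mem_cons.mp hx with rfl | hx
        · exact List.mem_cons_self
        · exact List.mem_cons_of_mem _ (hsub x hx)
      · intro x hx
        rcases List.mem_cons.mp hx with rfl | hx
        · simp
        · have := hall x hx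
          simpa using this

lemma pvCheckNbrs_true (E : PySem.Set Int) (l : List Int) (hE : ∀ w ∈ l, w ∉ E) :
    ∀ (q : List Int) (v : PySem.Set Int), v.Nodup →
    ∃ fresh : List Int,
      pvCheckNbrs E l q v = (true, q ++ fresh, v ++ fresh) ∧
      (v ++ fresh).Nodup ∧ (∀ x ∈ fresh, x ∈ l) ∧ (∀ w ∈ l, w ∈ v ++ fresh) := by
  induction l with
  | nil => intro q v hn; exact ⟨[], by simp [pvCheckNbrs], by simpa, by simp, by simp⟩
  | cons nb rest ih =>
    intro q v hn
    have hnbE : nb ∉ E := hE nb List.mem_cons_self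
    have hE' : ∀ w ∈ rest, w ∉ E := fun w hw => hE w (List.mem_cons_of_mem _ hw)
    by_cases h : nb ∈ v
    · have hstep : pvCheckNbrs E (nb :: rest) q v = pvCheckNbrs E rest q v := by
        simp [pvCheckNbrs, h, hnbE]
      rw [hstep]
      obtain ⟨fresh, heq, hnd, hsub, hall⟩ := ih hE' q v hn
      exact ⟨fresh, heq, hnd, fun x hx => List.mem_cons_of_mem _ (hsub x hx),
        by
          intro x hx
          rcases List.mem_cons.mp hx with rfl | hx
          · exact List.mem_append_left _ h
          · exact hall x hx⟩
    · have hadd : PySem.Set.add v nb = v ++ [nb] := PySem.Set.add_of_not_mem h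
      have hstep : pvCheckNbrs E (nb :: rest) q v = pvCheckNbrs E rest (q ++ [nb]) (v ++ [nb]) := by
        simp [pvCheckNbrs, h, hnbE]
      rw [hstep]
      have hnd' : (v ++ [nb]).Nodup := by
        simp [List.nodup_append, hn]
        exact fun a ha hab => h (hab ▸ ha)
      obtain ⟨fresh, heq, hnd2, hsub, hall⟩ := ih hE' (q ++ [nb]) (v ++ [nb]) hnd'
      refine ⟨nb :: fresh, ?_, ?_, ?_, ?_⟩
      · rw [heq]; simp
      · simpa using hnd2
      · intro x hx
        rcases List.mem_cons.mp hx with rfl | hx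
        · exact List.mem_cons_self
        · exact List.mem_cons_of_mem _ (hsub x hx)
      · intro x hx
        rcases List.mem_cons.mp hx with rfl | hx
        · simp
        · have := hall x hx
          simpa using this

lemma pvCheckNbrs_false (E : PySem.Set Int) (l : List Int) (hE : ∃ w ∈ l, w ∈ E) :
    ∀ (q : List Int) (v : PySem.Set Int), (pvCheckNbrs E l q v).1 = false := by
  induction l with
  | nil => simp at hE
  | cons nb rest ih =>
    intro q v
    by_cases hnbE : nb ∈ E
    · by_cases h : nb ∈ v <;> simp [pvCheckNbrs, h, hnbE]
    · have hE' : ∃ w ∈ rest, w ∈ E := by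
        rcases hE with ⟨w, hw, hwE⟩
        rcases List.mem_cons.mp hw with rfl | hw
        · exact absurd hwE hnbE
        · exact ⟨w, hw, hwE⟩
      by_cases h : nb ∈ v <;> simp [pvCheckNbrs, h, hnbE, ih hE']

-- === the while-loops of A ===

lemma pvBfsLoop_spec (g : PySem.Dict Int (List Int)) (src U : List Int)
    (hT : ∀ u w, w ∈ PySem.Dict.getD g u [] → w ∈ U) :
    ∀ (fuel : Nat) (q : List Int) (v explored : PySem.Set Int),
    q.length + U.toFinset.card ≤ fuel + v.length →
    (∀ x ∈ v, x ∈ U) → v.Nodup →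
    (∀ x ∈ q, x ∈ v) →
    (∀ x ∈ v, x ∈ explored ∨ x ∈ q) →
    (∀ u ∈ explored, ∀ w ∈ PySem.Dict.getD g u [], w ∈ v) →
    (∀ x ∈ explored, x ∈ v) →
    (∀ x ∈ v, pvReach g src x) →
    (∀ x ∈ v, x ∈ pvBfsLoop g fuel q v explored) ∧
    (∀ x ∈ pvBfsLoop g fuel q v explored, pvReach g src x) ∧
    (∀ u ∈ pvBfsLoop g fuel q v explored, ∀ w ∈ PySem.Dict.getD g u [],
      w ∈ pvBfsLoop g fuel q v explored) := by
  intro fuel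
  induction fuel with
  | zero =>
    intro q v explored hfuel hvU hnd hqv hve hcl hexp hR
    match q with
    | [] =>
      simp only [pvBfsLoop]
      refine ⟨fun x hx => ?_, fun x hx => hR x (hexp x hx), fun u hu w hw => ?_⟩
      · rcases hve x hx with h | h
        · exact h
        · simp at h
      · rcases hve _ (hcl u hu w hw) with h | h
        · exact h
        · simp at h
    | node :: queue =>
      exfalso
      have := pvNodup_length_le v U hnd hvU
      simp at hfuel
      omega
  | succ fuel ih =>
    intro q v explored hfuel hvU hnd hqv hve hcl hexp hR
    match q with
    | [] =>
      simp only [pvBfsLoop]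
      refine ⟨fun x hx => ?_, fun x hx => hR x (hexp x hx), fun u hu w hw => ?_⟩
      · rcases hve x hx with h | h
        · exact h
        · simp at h
      · rcases hve _ (hcl u hu w hw) with h | h
        · exact h
        · simp at h
    | node :: queue =>
      have hnodev : node ∈ v := hqv node List.mem_cons_self
      obtain ⟨fresh, heq, hnd', hsub, hall⟩ :=
        pvBfsFold_spec (PySem.Dict.getD g node []) queue v hnd
      have hstep : pvBfsLoop g (fuel + 1) (node :: queue) v explored =
          pvBfsLoop g fuel (queue ++ fresh) (v ++ fresh) (PySem.Set.add explored node) := by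
        simp only [pvBfsLoop]
        rw [heq]
      rw [hstep]
      have hfreshU : ∀ x ∈ fresh, x ∈ U := fun x hx => hT node x (hsub x hx)
      have hfreshR : ∀ x ∈ fresh, pvReach g src x :=
        fun x hx => pvReach.step node x (hR node hnodev) (hsub x hx)
      have := ih (queue ++ fresh) (v ++ fresh) (PySem.Set.add explored node)
        (by simp at hfuel ⊢; omega)
        (by intro x hx; rcases List.mem_append.mp hx with h | h
            exacts [hvU x h, hfreshU x h])
        hnd'
        (by intro x hx; rcases List.mem_append.mp hx with h | h
            exacts [List.mem_append_left _ (hqv x (List.mem_cons_of_mem _ h)),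
              List.mem_append_right _ h])
        (by intro x hx
            rcases List.mem_append.mp hx with h | h
            · rcases hve x h with h2 | h2
              · exact Or.inl (by rw [PySem.Set.mem_add _ _ _]; exact Or.inl h2)
              · rcases List.mem_cons.mp h2 with rfl | h3
                · exact Or.inl (by rw [PySem.Set.mem_add _ _ _]; exact Or.inr rfl)
                · exact Or.inr (List.mem_append_left _ h3)
            · exact Or.inr (List.mem_append_right _ h))
        (by intro u hu w hw
            rcases (PySem.Set.mem_add _ _ _).mp hu with h | rfl
            · exact List.mem_append_left _ (hcl u h w hw)
            · exact hall w hw)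
        (by intro x hx
            rcases (PySem.Set.mem_add _ _ _).mp hx with h | rfl
            · exact List.mem_append_left _ (hexp x h)
            · exact List.mem_append_left _ hnodev)
        (by intro x hx; rcases List.mem_append.mp hx with h | h
            exacts [hR x h, hfreshR x h])
      exact ⟨fun x hx => this.1 x (List.mem_append_left _ hx), this.2.1, this.2.2⟩

lemma pvCheckLoop_spec (g : PySem.Dict Int (List Int)) (src : List Int) (E U : List Int)
    (hT : ∀ u w, w ∈ PySem.Dict.getD g u [] → w ∈ U) :
    ∀ (fuel : Nat) (q : List Int) (v : PySem.Set Int),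
    q.length + U.toFinset.card ≤ fuel + v.length →
    (∀ x ∈ v, x ∈ U) → v.Nodup →
    (∀ x ∈ q, x ∈ v) →
    (∀ x ∈ v, pvReach g src x) →
    (∀ x ∈ v, x ∉ E) →
    (∀ u ∈ v, u ∉ q → ∀ w ∈ PySem.Dict.getD g u [], w ∈ v) →
    ((pvCheckLoop g E fuel q v).1 = true →
      ((∀ x ∈ v, x ∈ (pvCheckLoop g E fuel q v).2) ∧
       ((pvCheckLoop g E fuel q v).2).Nodup ∧
       (∀ x ∈ (pvCheckLoop g E fuel q v).2, x ∈ U) ∧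
       (∀ x ∈ (pvCheckLoop g E fuel q v).2, pvReach g src x) ∧
       (∀ x ∈ (pvCheckLoop g E fuel q v).2, x ∉ E) ∧
       (∀ u ∈ (pvCheckLoop g E fuel q v).2, ∀ w ∈ PySem.Dict.getD g u [],
         w ∈ (pvCheckLoop g E fuel q v).2))) ∧
    ((pvCheckLoop g E fuel q v).1 = false → ∃ x, pvReach g src x ∧ x ∈ E) := by
  intro fuel
  induction fuel with
  | zero =>
    intro q v hfuel hvU hnd hqv hR hE hcl
    match q with
    | [] =>
      simp only [pvCheckLoop]
      refine ⟨fun _ => ⟨fun x hx => hx, hnd, hvU, hR, hE, fun u hu w hw => hcl u hu (by simp) w hw⟩,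
        fun h => by simp at h⟩
    | node :: queue =>
      exfalso
      have := pvNodup_length_le v U hnd hvU
      simp at hfuel
      omega
  | succ fuel ih =>
    intro q v hfuel hvU hnd hqv hR hE hcl
    match q with
    | [] =>
      simp only [pvCheckLoop]
      refine ⟨fun _ => ⟨fun x hx => hx, hnd, hvU, hR, hE, fun u hu w hw => hcl u hu (by simp) w hw⟩,
        fun h => by simp at h⟩
    | node :: queue =>
      have hnodev : node ∈ v := hqv node List.mem_cons_self
      by_cases hcross : ∃ w ∈ PySem.Dict.getD g node [], w ∈ E
      · have hfalse := pvCheckNbrs_false E (PySem.Dict.getD g node []) hcross queue v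
        have hstep : pvCheckLoop g E (fuel + 1) (node :: queue) v =
            (false, (pvCheckNbrs E (PySem.Dict.getD g node []) queue v).2.2) := by
          simp only [pvCheckLoop]
          rw [if_neg (by simp [hfalse])]
        rw [hstep]
        refine ⟨fun h => by simp at h, fun _ => ?_⟩
        rcases hcross with ⟨w, hw, hwE⟩
        exact ⟨w, pvReach.step node w (hR node hnodev) hw, hwE⟩
      · have hcross2 : ∀ w ∈ PySem.Dict.getD g node [], w ∉ E :=
          fun w hw hwE => hcross ⟨w, hw, hwE⟩
        obtain ⟨fresh, heq, hnd', hsub, hall⟩ :=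
          pvCheckNbrs_true E (PySem.Dict.getD g node []) hcross2 queue v hnd
        have hstep : pvCheckLoop g E (fuel + 1) (node :: queue) v =
            pvCheckLoop g E fuel (queue ++ fresh) (v ++ fresh) := by
          simp only [pvCheckLoop]
          rw [heq]
          simp
        rw [hstep]
        have hfreshU : ∀ x ∈ fresh, x ∈ U := fun x hx => hT node x (hsub x hx)
        have hfreshR : ∀ x ∈ fresh, pvReach g src x :=
          fun x hx => pvReach.step node x (hR node hnodev) (hsub x hx)
        have := ih (queue ++ fresh) (v ++ fresh)
          (by simp at hfuel ⊢; omega)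
          (by intro x hx; rcases List.mem_append.mp hx with h | h
              exacts [hvU x h, hfreshU x h])
          hnd'
          (by intro x hx; rcases List.mem_append.mp hx with h | h
              exacts [List.mem_append_left _ (hqv x (List.mem_cons_of_mem _ h)),
                List.mem_append_right _ h])
          (by intro x hx; rcases List.mem_append.mp hx with h | h
              exacts [hR x h, hfreshR x h])
          (by intro x hx
              rcases List.mem_append.mp hx with h | h
              exacts [hE x h, hcross2 x (hsub x h)])
          (by intro x hx hnq w hw
              rcases List.mem_append.mp hx with h | h
              · by_cases hxn : x = node
                · subst hxn
                  exact hall w hw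
                · have : x ∉ node :: queue := by
                    intro hmem
                    rcases List.mem_cons.mp hmem with rfl | h2
                    · exact hxn rfl
                    · exact hnq (List.mem_append_left _ h2)
                  exact List.mem_append_left _ (hcl x h this w hw)
              · exact absurd (List.mem_append_right _ h) hnq)
        exact ⟨fun h => ⟨fun x hx => (this.1 h).1 x (List.mem_append_left _ hx),
          (this.1 h).2.1, (this.1 h).2.2.1, (this.1 h).2.2.2.1,
          (this.1 h).2.2.2.2.1, (this.1 h).2.2.2.2.2⟩, this.2⟩

-- === A's outer 'for i in range(n)' loop ===

lemma pvFlagStep_snd_true (g : PySem.Dict Int (List Int)) (E : PySem.Set Int) (fuel : Nat)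
    (v : PySem.Set Int) (j : Int) : (pvFlagStep g E fuel (v, true) j).2 = true := by
  simp only [pvFlagStep]
  split_ifs <;> rfl

lemma pvFlagFold_true (g : PySem.Dict Int (List Int)) (E : PySem.Set Int) (fuel : Nat) :
    ∀ (l : List Int) (v : PySem.Set Int),
    ((l.foldl (pvFlagStep g E fuel) (v, true)).2 = true) := by
  intro l
  induction l with
  | nil => intro v; rfl
  | cons j rest ih =>
    intro v
    rw [List.foldl_cons,
      show pvFlagStep g E fuel (v, true) j = ((pvFlagStep g E fuel (v, true) j).1, true) from
        Prod.ext_iff.mpr ⟨rfl, pvFlagStep_snd_true g E fuel v j⟩]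
    exact ih _

lemma pvFlagFold_spec (g : PySem.Dict Int (List Int)) (src E U : List Int) (fuel : Nat)
    (hT : ∀ u w, w ∈ PySem.Dict.getD g u [] → w ∈ U)
    (hfuel : U.toFinset.card + 1 ≤ fuel)
    (hsrcU : ∀ j ∈ src, j ∈ U)
    (hsrcR : ∀ j ∈ src, pvReach g src j) :
    ∀ (l : List Int) (v : PySem.Set Int) (flag : Bool),
    (∀ j ∈ l, j ∉ E → j ∈ src) →
    (flag = false → (v.Nodup ∧ (∀ x ∈ v, x ∈ U) ∧ (∀ x ∈ v, pvReach g src x) ∧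
       (∀ x ∈ v, x ∉ E) ∧ (∀ u ∈ v, ∀ w ∈ PySem.Dict.getD g u [], w ∈ v))) →
    (flag = true → ∃ x, pvReach g src x ∧ x ∈ E) →
    (((l.foldl (pvFlagStep g E fuel) (v, flag)).2 = true → ∃ x, pvReach g src x ∧ x ∈ E) ∧
     ((l.foldl (pvFlagStep g E fuel) (v, flag)).2 = false →
       ((∀ x ∈ v, x ∈ (l.foldl (pvFlagStep g E fuel) (v, flag)).1) ∧
        (∀ j ∈ l, j ∉ E → j ∈ (l.foldl (pvFlagStep g E fuel) (v, flag)).1) ∧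
        (∀ x ∈ (l.foldl (pvFlagStep g E fuel) (v, flag)).1, x ∉ E) ∧
        (∀ u ∈ (l.foldl (pvFlagStep g E fuel) (v, flag)).1, ∀ w ∈ PySem.Dict.getD g u [],
          w ∈ (l.foldl (pvFlagStep g E fuel) (v, flag)).1)))) := by
  intro l
  induction l with
  | nil =>
    intro v flag hl hgood hcross
    constructor
    · intro h
      exact hcross h
    · intro h
      subst h
      obtain ⟨hnd, hU, hR, hE, hcl⟩ := hgood rfl
      exact ⟨fun x hx => hx, by simp, hE, hcl⟩
  | cons j rest ih =>
    intro v flag hl hgood hcross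
    rw [List.foldl_cons]
    by_cases hjE : j ∈ E
    · have hstep : pvFlagStep g E fuel (v, flag) j = (v, flag) := by
        simp [pvFlagStep, hjE]
      rw [hstep]
      have := ih v flag (fun j' hj' => hl j' (List.mem_cons_of_mem _ hj')) hgood hcross
      refine ⟨this.1, fun h => ⟨(this.2 h).1, ?_, (this.2 h).2.2.1, (this.2 h).2.2.2⟩⟩
      intro j' hj' hj'E
      rcases List.mem_cons.mp hj' with rfl | hj'
      · exact absurd hjE hj'E
      · exact (this.2 h).2.1 j' hj' hj'E
    · cases flag with
      | true =>
        rw [show pvFlagStep g E fuel (v, true) j = ((pvFlagStep g E fuel (v, true) j).1, true) from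
          Prod.ext_iff.mpr ⟨rfl, pvFlagStep_snd_true g E fuel v j⟩]
        refine ⟨fun _ => hcross rfl, fun h => ?_⟩
        rw [pvFlagFold_true] at h
        cases h
      | false =>
        obtain ⟨hnd, hU, hR, hE, hcl⟩ := hgood rfl
        by_cases hjv : j ∈ v
        · have hstep : pvFlagStep g E fuel (v, false) j = (v, false) := by
            simp [pvFlagStep, hjE, hjv]
          rw [hstep]
          have := ih v false (fun j' hj' => hl j' (List.mem_cons_of_mem _ hj'))
            (fun _ => ⟨hnd, hU, hR, hE, hcl⟩) (fun h => by simp at h)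
          refine ⟨this.1, fun h => ⟨(this.2 h).1, ?_, (this.2 h).2.2.1, (this.2 h).2.2.2⟩⟩
          intro j' hj' hj'E
          rcases List.mem_cons.mp hj' with rfl | hj'
          · exact (this.2 h).1 j' hjv
          · exact (this.2 h).2.1 j' hj' hj'E
        · have hjsrc : j ∈ src := hl j List.mem_cons_self hjE
          have haddnd : (PySem.Set.add v j).Nodup := PySem.Set.nodup_add v j hnd
          have haddeq : PySem.Set.add v j = v ++ [j] := PySem.Set.add_of_not_mem hjv
          have hcheck := pvCheckLoop_spec g src E U hT fuel [j] (PySem.Set.add v j)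
            (by
              have h1 : (PySem.Set.add v j).length = v.length + 1 := by
                rw [haddeq]; simp
              simp only [List.length_cons, List.length_nil, h1]
              omega)
            (by intro x hx
                rcases (PySem.Set.mem_add _ _ _).mp hx with h | rfl
                exacts [hU x h, hsrcU _ hjsrc])
            haddnd
            (by intro x hx
                simp at hx
                subst hx
                rw [PySem.Set.mem_add _ _ _]
                exact Or.inr rfl)
            (by intro x hx
                rcases (PySem.Set.mem_add _ _ _).mp hx with h | rfl
                exacts [hR x h, hsrcR _ hjsrc])
            (by intro x hx
                rcases (PySem.Set.mem_add _ _ _).mp hx with h | rfl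
                exacts [hE x h, hjE])
            (by intro u hu hnq w hw
                rcases (PySem.Set.mem_add _ _ _).mp hu with h | rfl
                · rw [PySem.Set.mem_add _ _ _]
                  exact Or.inl (hcl u h w hw)
                · exact absurd (by simp : u ∈ [u]) hnq)
          cases hc : (pvCheckLoop g E fuel [j] (PySem.Set.add v j)).1 with
          | true =>
            set v' := (pvCheckLoop g E fuel [j] (PySem.Set.add v j)).2 with hv'def
            have hstep : pvFlagStep g E fuel (v, false) j = (v', false) := by
              simp only [pvFlagStep]
              rw [if_neg hjE, if_neg hjv, if_pos hc]
            rw [hstep]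
            obtain ⟨hmono, hnd2, hU2, hR2, hE2, hcl2⟩ := hcheck.1 hc
            have := ih v' false (fun j' hj' => hl j' (List.mem_cons_of_mem _ hj'))
              (fun _ => ⟨hnd2, hU2, hR2, hE2, hcl2⟩) (fun h => by simp at h)
            refine ⟨this.1, fun h => ⟨?_, ?_, (this.2 h).2.2.1, (this.2 h).2.2.2⟩⟩
            · intro x hx
              exact (this.2 h).1 x (hmono x (by rw [haddeq]; exact List.mem_append_left _ hx))
            · intro j' hj' hj'E
              rcases List.mem_cons.mp hj' with rfl | hj'
              · exact (this.2 h).1 j' (hmono j' (by rw [haddeq]; simp))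
              · exact (this.2 h).2.1 j' hj' hj'E
          | false =>
            have hstep : (pvFlagStep g E fuel (v, false) j).2 = true := by
              simp only [pvFlagStep]
              rw [if_neg hjE, if_neg hjv, if_neg (by simp [hc])]
            rw [show pvFlagStep g E fuel (v, false) j = ((pvFlagStep g E fuel (v, false) j).1, true) from
              Prod.ext_iff.mpr ⟨rfl, hstep⟩]
            have hcross' : ∃ x, pvReach g src x ∧ x ∈ E := hcheck.2 hc
            refine ⟨fun _ => hcross', fun h => ?_⟩
            rw [pvFlagFold_true] at h
            cases h

theorem remainingMethods_spec : Claim_equal_remainingMethods := by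
  unfold Claim_equal_remainingMethods
  intro n k inv _ _
  unfold Spec_remainingMethods
  simp only [remainingMethods, remainingMethods_alt]
  set g := pvBuildGraphA inv with hg
  set T := (PySem.Dict.values g).flatten with hTdef
  set fuel := T.length + n.toNat + 1 with hfueldef
  have hstart : PySem.Set.add PySem.Set.empty k = [k] := by
    rw [PySem.Set.add_of_not_mem (by simp)]
    rfl
  rw [hstart]
  set EA := pvBfsLoop g fuel [k] [k] PySem.Set.empty with hEAdef
  set E := pvSaturate inv [k] 0 1 with hEdef
  set Bad := pvSaturate inv E 1 0 with hBaddef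
  have htargetk : ∀ u w, w ∈ PySem.Dict.getD g u [] → w ∈ (k :: T) :=
    fun u w hw => List.mem_cons_of_mem _ (pvMem_flatten_values g u w hw)
  have hcardk : (k :: T).toFinset.card ≤ fuel := by
    have h1 : (k :: T).toFinset.card ≤ (k :: T).length := List.toFinset_card_le _
    simp only [List.length_cons] at h1
    omega
  -- characterise A's explored set
  obtain ⟨hAsub, hAsound, hAclosed⟩ :=
    pvBfsLoop_spec g [k] (k :: T) htargetk fuel [k] [k] PySem.Set.empty
      (by simp only [List.length_cons, List.length_nil]; omega)
      (by simp)
      (by simp)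
      (fun x hx => hx)
      (fun x hx => Or.inr hx)
      (by simp)
      (by simp)
      (by intro x hx; simp at hx; subst hx; exact pvReach.base x (by simp))
  have hmemA : ∀ x, x ∈ EA ↔ pvReach g [k] x := by
    intro x
    refine ⟨hAsound x, fun h => pvReach_subset_closed g [k] EA ?_ hAclosed x h⟩
    intro y hy
    simp at hy
    subst hy
    exact hAsub y (by simp)
  -- A's and B's explored sets have the same members
  have hmemE : ∀ x, x ∈ E ↔ pvClos inv 0 1 [k] x := fun x => pvMem_saturate inv [k] 0 1 x
  have hmemAB : ∀ x, (x ∈ EA ↔ x ∈ E) := by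
    intro x
    rw [hmemA x, hmemE x, hg, pvReach_iff_clos]
  -- the two suspect lists coincide
  have hsusp : (PySem.List.pyRange 0 n 1).filter (fun i => !(PySem.Set.contains EA i)) =
      (PySem.List.pyRange 0 n 1).filter (fun i => !(PySem.Set.contains E i)) := by
    apply List.filter_congr
    intro i _
    cases hA2 : PySem.Set.contains EA i <;> cases hB2 : PySem.Set.contains E i <;> try rfl
    · exfalso
      have hiB : i ∈ E := (PySem.Set.contains_iff E i).mp hB2
      have hiA : i ∈ EA := (hmemAB i).mpr hiB
      rw [(PySem.Set.contains_iff EA i).mpr hiA] at hA2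
      cases hA2
    · exfalso
      have hiA : i ∈ EA := (PySem.Set.contains_iff EA i).mp hA2
      have hiB : i ∈ E := (hmemAB i).mp hiA
      rw [(PySem.Set.contains_iff E i).mpr hiB] at hB2
      cases hB2
  set S := (PySem.List.pyRange 0 n 1).filter (fun i => !(PySem.Set.contains EA i)) with hSdef
  have hSmem : ∀ j, j ∈ S ↔ (j ∈ PySem.List.pyRange 0 n 1 ∧ j ∉ EA) := by
    intro j
    rw [hSdef, List.mem_filter]
    simp
  -- A's answer list is the suspect list
  have hans : (PySem.List.pyRange 0 n 1).foldl
      (fun ans i => if i ∈ EA then ans else ans ++ [i]) [] = S := by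
    have hfun : (fun (ans : List Int) (i : Int) => if i ∈ EA then ans else ans ++ [i]) =
        (fun (ans : List Int) (i : Int) =>
          if (fun i => !(PySem.Set.contains EA i)) i = true then ans ++ [(fun (x : Int) => x) i]
          else ans) := by
      funext ans i
      by_cases h : i ∈ EA <;> simp [h]
    rw [hfun, PySem.List.foldl_append_if]
    simp [hSdef]
  -- A's flag machinery
  set U' := (PySem.List.pyRange 0 n 1) ++ T with hU'def
  have htarget' : ∀ u w, w ∈ PySem.Dict.getD g u [] → w ∈ U' :=
    fun u w hw => List.mem_append_right _ (pvMem_flatten_values g u w hw)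
  have hcard' : U'.toFinset.card + 1 ≤ fuel := by
    have h1 := List.toFinset_card_le U'
    have hlen : U'.length = n.toNat + T.length := by
      rw [hU'def, List.length_append, PySem.List.length_pyRange_one]
      simp
    omega
  have hSU' : ∀ j ∈ S, j ∈ U' :=
    fun j hj => List.mem_append_left _ ((hSmem j).mp hj).1
  have hSnotEA : ∀ j ∈ S, j ∉ EA := fun j hj => ((hSmem j).mp hj).2
  have hflag := pvFlagFold_spec g S EA U' fuel htarget' hcard' hSU'
    (fun j hj => pvReach.base j hj)
    (PySem.List.pyRange 0 n 1) PySem.Set.empty false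
    (fun j hj hjE => (hSmem j).mpr ⟨hj, hjE⟩)
    (fun _ => ⟨by simp, by simp, by simp, by simp, by simp⟩)
    (fun h => by cases h)
  set rA := (PySem.List.pyRange 0 n 1).foldl (pvFlagStep g EA fuel) (PySem.Set.empty, false)
    with hrAdef
  set anyB := (PySem.List.pyRange 0 n 1).any
      (fun i => !(PySem.Set.contains E i) && PySem.Set.contains Bad i) with hanyBdef
  -- the flags agree
  have hflageq : rA.2 = anyB := by
    cases hA2 : rA.2 <;> cases hB2 : anyB <;> try rfl
    · -- A found no crossing, B did
      exfalso
      obtain ⟨i, hirange, hcond⟩ := List.any_eq_true.mp hB2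
      have hiE : i ∉ E := by
        intro h
        rw [(PySem.Set.contains_iff E i).mpr h] at hcond
        simp at hcond
      have hiBad : i ∈ Bad := by
        have h2 : PySem.Set.contains Bad i = true := by
          revert hcond
          cases PySem.Set.contains Bad i <;> simp
        exact (PySem.Set.contains_iff Bad i).mp h2
      have hclEi : pvClos inv 1 0 E i := (pvMem_saturate inv E 1 0 i).mp hiBad
      obtain ⟨e, heE, hclie⟩ := pvClos_bwd_to_fwd inv E i hclEi
      have hiEA : i ∉ EA := fun h => hiE ((hmemAB i).mp h)
      have hiS : i ∈ S := (hSmem i).mpr ⟨hirange, hiEA⟩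
      have hclSe : pvClos inv 0 1 S e :=
        pvClos_mono_seed inv 0 1 [i] S (by intro y hy; simp at hy; rw [hy]; exact hiS) hclie
      have hreach : pvReach g S e := by
        rw [hg, pvReach_iff_clos]
        exact hclSe
      have heEA : e ∈ EA := (hmemAB e).mpr heE
      obtain ⟨_, hcover, hEfree, hclosed⟩ := hflag.2 hA2
      have hsubS : ∀ j ∈ S, j ∈ rA.1 :=
        fun j hj => hcover j ((hSmem j).mp hj).1 ((hSmem j).mp hj).2
      have hein := pvReach_subset_closed g S rA.1 hsubS hclosed e hreach
      exact hEfree e hein heEA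
    · -- A found a crossing, B did not
      exfalso
      obtain ⟨x, hxreach, hxEA⟩ := hflag.1 hA2
      have hclSx : pvClos inv 0 1 S x := by
        rw [hg, pvReach_iff_clos] at hxreach
        exact hxreach
      obtain ⟨i, hiS, hclix⟩ := pvClos_exists_single inv 0 1 S x hclSx
      have hrev : pvClos inv 1 0 [x] i := pvClos_rev inv i x hclix
      have hxE : x ∈ E := (hmemAB x).mp hxEA
      have hclEi : pvClos inv 1 0 E i :=
        pvClos_mono_seed inv 1 0 [x] E (by intro y hy; simp at hy; rw [hy]; exact hxE) hrev
      have hiBad : i ∈ Bad := (pvMem_saturate inv E 1 0 i).mpr hclEi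
      have hirange : i ∈ PySem.List.pyRange 0 n 1 := ((hSmem i).mp hiS).1
      have hiE : i ∉ E := fun h => ((hSmem i).mp hiS).2 ((hmemAB i).mpr h)
      have := List.any_eq_false.mp hB2 i hirange
      rw [(PySem.Set.contains_iff Bad i).mpr hiBad] at this
      have hcE : PySem.Set.contains E i = false := by
        cases hcE2 : PySem.Set.contains E i
        · rfl
        · exact absurd ((PySem.Set.contains_iff E i).mp hcE2) hiE
      rw [hcE] at this
      simp at this
  rw [hans, hflageq, hsusp]
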